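-- pv_equiv track=rewrite | github.com/DaLaZh91/Text-Data-Analysis | functions.py | getAnzahlen
-- ===== SOURCE A (Python) =====
-- def getAnzahlen(vglwortvek, Klasse1, Klasse2):
--     inKl1 = []
--     for i in vglwortvek:
--         count = 0
--         for j in range(len(Klasse1)):
--             if i in Klasse1[j].split():
--                 count += 1
--             elif i in [' '.join(b) for l in [' '.join(Klasse1[j].split())] for b in zip(l.split(' ')[:-1], l.split(' ')[1:])]:
--                 count += 1
--         inKl1.append(count)
--
--     inKl2 = []
--     for i in vglwortvek:
--         count = 0
--         for j in range(len(Klasse2)):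
--             if i in Klasse2[j].split():
--                 count += 1
--             elif i in [' '.join(b) for l in [' '.join(Klasse2[j].split())] for b in zip(l.split(' ')[:-1], l.split(' ')[1:])]:
--                 count += 1
--         inKl2.append(count)
--
--     summeKl1 = 0
--     for j in range(len(Klasse1)):
--         if any(map(lambda v: v in vglwortvek, Klasse1[j].split())):
--             summeKl1 += 1
--         elif any(map(lambda v: v in vglwortvek, [' '.join(b) for l in [' '.join(Klasse1[j].split())] for b in zip(l.split(' ')[:-1], l.split(' ')[1:])])):
--             summeKl1 += 1
--
--     summeKl2 = 0
--     for j in range(len(Klasse2)):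
--         if any(map(lambda v: v in vglwortvek, Klasse2[j].split())):
--             summeKl2 += 1
--         elif any(map(lambda v: v in vglwortvek, [' '.join(b) for l in [' '.join(Klasse2[j].split())] for b in zip(l.split(' ')[:-1], l.split(' ')[1:])])):
--             summeKl2 += 1
--
--     return(inKl1, summeKl1, inKl2, summeKl2)
-- ===== SOURCE B (Python) =====
-- def getAnzahlen(vglwortvek, Klasse1, Klasse2):
--     vs = set(vglwortvek)
--
--     def feats(doc):
--         toks = doc.split()
--         fs = set(toks)
--         fs.update(' '.join(b) for b in zip(toks, toks[1:]))
--         return fs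
--
--     def stats(docs):
--         counts = {}
--         hits = 0
--         for doc in docs:
--             fs = feats(doc)
--             for t in fs:
--                 if t in vs:
--                     counts[t] = counts.get(t, 0) + 1
--             if not vs.isdisjoint(fs):
--                 hits += 1
--         return [counts.get(w, 0) for w in vglwortvek], hits
--
--     inKl1, summeKl1 = stats(Klasse1)
--     inKl2, summeKl2 = stats(Klasse2)
--     return (inKl1, summeKl1, inKl2, summeKl2)
-- ===== Notes on version B (the rewrite author's own statement) =====
-- stated objective: faster
-- what changed: Instead of re-scanning and re-tokenizing every document for every query word (and rebuilding its bigram list each time), B tokenizes each document once into a set of unigrams+bigrams, accumulates per-word document counts in one dict pass over the documents, and answers each query word by an O(1) lookup.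
import Mathlib
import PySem

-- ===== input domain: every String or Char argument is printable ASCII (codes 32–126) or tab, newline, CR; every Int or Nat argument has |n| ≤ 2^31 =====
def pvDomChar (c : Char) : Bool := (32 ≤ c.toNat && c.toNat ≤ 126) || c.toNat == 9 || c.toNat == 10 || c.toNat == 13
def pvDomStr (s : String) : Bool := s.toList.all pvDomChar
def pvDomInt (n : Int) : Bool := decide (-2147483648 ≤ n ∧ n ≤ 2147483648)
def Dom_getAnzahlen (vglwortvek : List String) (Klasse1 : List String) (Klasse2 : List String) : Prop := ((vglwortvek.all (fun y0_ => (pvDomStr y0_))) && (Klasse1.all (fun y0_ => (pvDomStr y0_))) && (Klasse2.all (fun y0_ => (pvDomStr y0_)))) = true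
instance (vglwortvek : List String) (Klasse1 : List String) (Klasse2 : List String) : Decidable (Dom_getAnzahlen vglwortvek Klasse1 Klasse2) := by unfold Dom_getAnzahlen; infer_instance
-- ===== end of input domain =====

-- B tokenizes each document once into a set of unigram+bigram features and counts documents per
-- query word with one dict pass instead of A's per-word rescan of every document.


-- ===== PORT A =====
-- A's bigram comprehension, with p = ' '.join(doc.split()).split(' ') written out at both uses:
-- [' '.join(b) for l in [' '.join(doc.split())] for b in zip(l.split(' ')[:-1], l.split(' ')[1:])]
def pvBigramsA (doc : String) : List String :=
  ((PySem.List.slice ((PySem.Str.split? (PySem.Str.join " " (PySem.Str.split₀ doc)) " ").getD []) none (some (-1))).zip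
   (PySem.List.slice ((PySem.Str.split? (PySem.Str.join " " (PySem.Str.split₀ doc)) " ").getD []) (some 1) none)).map
    (fun b => PySem.Str.join " " [b.1, b.2])

def getAnzahlen (vglwortvek : List String) (Klasse1 : List String) (Klasse2 : List String) : List Int × Int × List Int × Int :=
  let inKl1 := vglwortvek.map (fun i =>
    Klasse1.foldl (fun count s =>
      if (PySem.Str.split₀ s).contains i then count + 1
      else if (pvBigramsA s).contains i then count + 1
      else count) (0 : Int))
  let inKl2 := vglwortvek.map (fun i =>
    Klasse2.foldl (fun count s =>
      if (PySem.Str.split₀ s).contains i then count + 1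
      else if (pvBigramsA s).contains i then count + 1
      else count) (0 : Int))
  let summeKl1 := Klasse1.foldl (fun acc s =>
      if (PySem.Str.split₀ s).any (fun v => vglwortvek.contains v) then acc + 1
      else if (pvBigramsA s).any (fun v => vglwortvek.contains v) then acc + 1
      else acc) (0 : Int)
  let summeKl2 := Klasse2.foldl (fun acc s =>
      if (PySem.Str.split₀ s).any (fun v => vglwortvek.contains v) then acc + 1
      else if (pvBigramsA s).any (fun v => vglwortvek.contains v) then acc + 1
      else acc) (0 : Int)
  (inKl1, summeKl1, inKl2, summeKl2)

-- ===== PORT B =====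
-- feats(doc): the set of doc's tokens together with all joined adjacent-token pairs
def pvFeats (doc : String) : PySem.Set String :=
  let toks := PySem.Str.split₀ doc
  PySem.Set.update (PySem.Set.ofList toks)
    ((toks.zip toks.tail).map (fun b => PySem.Str.join " " [b.1, b.2]))

-- stats(docs): one pass over docs maintaining (counts dict, hits); then lookups per query word
def pvStats (vs : PySem.Set String) (vglwortvek : List String) (docs : List String) : List Int × Int :=
  let st := docs.foldl (fun (st : PySem.Dict String Int × Int) doc =>
    ((pvFeats doc).foldl (fun d t => if PySem.Set.contains vs t then d.modify t 0 (· + 1) else d) st.1,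
     if PySem.Set.isdisjoint vs (pvFeats doc) then st.2 else st.2 + 1)) (PySem.Dict.empty, 0)
  (vglwortvek.map (fun w => st.1.getD w 0), st.2)

def getAnzahlen_alt (vglwortvek : List String) (Klasse1 : List String) (Klasse2 : List String) : List Int × Int × List Int × Int :=
  let vs := PySem.Set.ofList vglwortvek
  let r1 := pvStats vs vglwortvek Klasse1
  let r2 := pvStats vs vglwortvek Klasse2
  (r1.1, r1.2, r2.1, r2.2)

-- ===== PRECONDITION & SPEC =====
def Spec_getAnzahlen (vglwortvek : List String) (Klasse1 : List String) (Klasse2 : List String) (out : List Int × Int × List Int × Int) : Prop := out = getAnzahlen_alt vglwortvek Klasse1 Klasse2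
instance (vglwortvek : List String) (Klasse1 : List String) (Klasse2 : List String) (out : List Int × Int × List Int × Int) : Decidable (Spec_getAnzahlen vglwortvek Klasse1 Klasse2 out) := by unfold Spec_getAnzahlen; infer_instance

-- ===== CLAIM (what is proved, stated in full; the proofs are below) =====
def Claim_equal_getAnzahlen : Prop := ∀ (vglwortvek : List String) (Klasse1 : List String) (Klasse2 : List String), Dom_getAnzahlen vglwortvek Klasse1 Klasse2 → Spec_getAnzahlen vglwortvek Klasse1 Klasse2 (getAnzahlen vglwortvek Klasse1 Klasse2)

-- ===== LEMMAS AND PROOFS =====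

-- structural twin of PySem.Chars.splitOn.go with sep = [' '] (whose fuel never runs out)
def pvSplitSp : List Char → List Char → List (List Char) → List (List Char)
  | [], cur, acc => (cur.reverse :: acc).reverse
  | c :: rest, cur, acc =>
      if c = ' ' then pvSplitSp rest [] (cur.reverse :: acc) else pvSplitSp rest (c :: cur) acc

theorem pv_go_eq_splitSp : ∀ (fuel : Nat) (l cur : List Char) (acc : List (List Char)),
    l.length < fuel → PySem.Chars.splitOn.go [' '] fuel l cur acc = pvSplitSp l cur acc := by
  intro fuel
  induction fuel with
  | zero => intro l cur acc h; omega
  | succ n ih =>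
    intro l cur acc h
    cases l with
    | nil => simp [PySem.Chars.splitOn.go, pvSplitSp]
    | cons c rest =>
      rw [PySem.Chars.splitOn.go]
      by_cases hc : c = ' '
      · subst hc
        simp only [pvSplitSp, if_pos rfl]
        rw [if_pos (by simp [List.isPrefixOf])]
        simp only [List.length_cons] at h
        simpa using ih rest [] ((cur.reverse) :: acc) (by omega)
      · rw [if_neg (by simp [List.isPrefixOf]; exact fun h' => hc h'.symm)]
        simp only [pvSplitSp, if_neg hc]
        exact ih rest (c :: cur) acc (by simp at h ⊢; omega)

theorem pv_splitSp_consume : ∀ (t l cur : List Char) (acc : List (List Char)),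
    (∀ c ∈ t, c ≠ ' ') → pvSplitSp (t ++ l) cur acc = pvSplitSp l (t.reverse ++ cur) acc := by
  intro t
  induction t with
  | nil => intro l cur acc _; simp
  | cons c t ih =>
    intro l cur acc hsp
    have hc : c ≠ ' ' := hsp c (by simp)
    simp only [List.cons_append, pvSplitSp, if_neg hc]
    rw [ih l (c :: cur) acc (fun d hd => hsp d (by simp [hd]))]
    simp

theorem pv_splitSp_intercalate : ∀ (toks : List (List Char)) (acc : List (List Char)),
    toks ≠ [] → (∀ t ∈ toks, ∀ c ∈ t, c ≠ ' ') →
    pvSplitSp (List.intercalate [' '] toks) [] acc = acc.reverse ++ toks := by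
  intro toks
  induction toks with
  | nil => intro acc h; exact absurd rfl h
  | cons t rest ih =>
    intro acc _ hsp
    cases rest with
    | nil =>
      have hone : List.intercalate [' '] [t] = t := by simp [List.intercalate, List.intersperse]
      rw [hone]
      have := pv_splitSp_consume t [] [] acc (hsp t (by simp))
      simp only [List.append_nil] at this
      rw [this]
      simp [pvSplitSp]
    | cons u rest' =>
      have : List.intercalate [' '] (t :: u :: rest') = t ++ [' '] ++ List.intercalate [' '] (u :: rest') := by
        simp [List.intercalate, List.intersperse]
      rw [this]
      rw [List.append_assoc, pv_splitSp_consume t _ [] acc (hsp t (by simp))]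
      have : pvSplitSp ([' '] ++ List.intercalate [' '] (u :: rest')) (t.reverse ++ []) acc
           = pvSplitSp (List.intercalate [' '] (u :: rest')) [] (t :: acc) := by
        simp [pvSplitSp]
      rw [this, ih (t :: acc) (by simp) (fun x hx => hsp x (by simp at hx ⊢; tauto))]
      simp

theorem pv_go_no_space : ∀ (s cur : List Char) (acc : List (List Char)),
    (∀ c ∈ cur, PySem.Chars.isspace c = false) →
    (∀ t ∈ acc, ∀ c ∈ t, PySem.Chars.isspace c = false) →
    ∀ t ∈ PySem.Chars.split₀.go s cur acc, ∀ c ∈ t, PySem.Chars.isspace c = false := by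
  intro s
  induction s with
  | nil =>
    intro cur acc hcur hacc t ht
    simp only [PySem.Chars.split₀.go] at ht
    by_cases h : cur.isEmpty
    · rw [if_pos h] at ht
      simp at ht
      exact hacc t ht
    · rw [if_neg h] at ht
      simp at ht
      rcases ht with h1 | h2
      · exact hacc t h1
      · subst h2; intro c hc; exact hcur c (by simpa using hc)
  | cons c rest ih =>
    intro cur acc hcur hacc t ht
    simp only [PySem.Chars.split₀.go] at ht
    by_cases hsp : PySem.Chars.isspace c
    · rw [if_pos hsp] at ht
      by_cases he : cur.isEmpty
      · rw [if_pos he] at ht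
        exact ih [] acc (by simp) hacc t ht
      · rw [if_neg he] at ht
        refine ih [] (cur.reverse :: acc) (by simp) ?_ t ht
        intro u hu
        simp at hu
        rcases hu with h1 | h2
        · subst h1; intro d hd; exact hcur d (by simpa using hd)
        · exact hacc u h2
    · rw [if_neg hsp] at ht
      refine ih (c :: cur) acc ?_ hacc t ht
      intro d hd
      simp at hd
      rcases hd with h1 | h2
      · subst h1; simpa using hsp
      · exact hcur d h2

-- tokens produced by split₀ contain no space characters
theorem pv_split₀_no_space : ∀ (s : String), ∀ t ∈ PySem.Str.split₀ s, ∀ c ∈ t.toList, c ≠ ' ' := by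
  intro s t ht c hc
  have hmem : t.toList ∈ PySem.Chars.split₀ s.toList := by
    rw [← PySem.Str.split₀_map_toList]
    exact List.mem_map_of_mem ht
  have := pv_go_no_space s.toList [] [] (by simp) (by simp) t.toList hmem c hc
  intro h; subst h; simp [PySem.Chars.isspace] at this

-- the join-then-split(' ') roundtrip A performs gives the tokens back (or [""] for no tokens)
theorem pv_roundtrip (s : String) :
    (PySem.Str.split? (PySem.Str.join " " (PySem.Str.split₀ s)) " ").getD []
      = if PySem.Str.split₀ s = [] then [""] else PySem.Str.split₀ s := by
  set toks := PySem.Str.split₀ s with htoks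
  set X := PySem.Str.join " " toks with hX
  have hXl : X.toList = List.intercalate [' '] (toks.map String.toList) := by
    rw [hX, PySem.Str.toList_join]; rfl
  have hsplit : Option.map (List.map String.toList) (PySem.Str.split? X " ")
      = some (PySem.Chars.splitOn X.toList [' ']) := by
    rw [PySem.Str.split?_map]
    simp [PySem.Chars.split?]
  have key : ∀ (tgt : List String), PySem.Chars.splitOn X.toList [' '] = tgt.map String.toList →
      (PySem.Str.split? X " ").getD [] = tgt := by
    intro tgt h
    rw [h] at hsplit
    cases hopt : PySem.Str.split? X " " with
    | none => rw [hopt] at hsplit; simp at hsplit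
    | some ps =>
      rw [hopt] at hsplit
      simp only [Option.map_some, Option.some.injEq] at hsplit
      have hinj : Function.Injective String.toList := fun a b h => String.toList_inj.mp h
      have := List.map_injective_iff.mpr hinj hsplit
      simp [this]
  by_cases hnil : toks = []
  · rw [if_pos hnil]
    apply key [""]
    have hX0 : X.toList = [] := by rw [hXl, hnil]; rfl
    rw [hX0]; decide
  · rw [if_neg hnil]
    apply key toks
    have hns : ∀ t ∈ toks.map String.toList, ∀ c ∈ t, c ≠ ' ' := by
      intro t ht c hc
      simp at ht
      obtain ⟨u, hu, rfl⟩ := ht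
      exact pv_split₀_no_space s u hu c hc
    rw [hXl, PySem.Chars.splitOn]
    rw [pv_go_eq_splitSp _ _ _ _ (by omega)]
    rw [pv_splitSp_intercalate _ [] (by simpa using hnil) hns]
    rfl

theorem pv_zip_dropLast_tail {α : Type} : ∀ (xs : List α), xs.dropLast.zip xs.tail = xs.zip xs.tail := by
  intro xs
  induction xs with
  | nil => rfl
  | cons x xs ih =>
    cases xs with
    | nil => rfl
    | cons y r =>
      simp only [List.dropLast_cons₂, List.zip_cons_cons, List.tail_cons] at *
      rw [ih]

-- A's bigram list is B's bigram list
theorem pv_bigramsA_eq (s : String) :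
    pvBigramsA s = ((PySem.Str.split₀ s).zip (PySem.Str.split₀ s).tail).map
      (fun b => PySem.Str.join " " [b.1, b.2]) := by
  unfold pvBigramsA
  rw [pv_roundtrip]
  by_cases hnil : PySem.Str.split₀ s = []
  · rw [if_pos hnil, hnil]
    decide
  · rw [if_neg hnil]
    rw [PySem.List.slice_to_neg_one, PySem.List.slice_from_one, pv_zip_dropLast_tail]

theorem pv_nodup_feats (s : String) : (pvFeats s).Nodup :=
  PySem.Set.nodup_update _ _ (PySem.Set.nodup_ofList _)

theorem pv_mem_feats (i s : String) :
    i ∈ pvFeats s ↔ (i ∈ PySem.Str.split₀ s ∨ i ∈ pvBigramsA s) := by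
  unfold pvFeats
  rw [PySem.Set.mem_update, PySem.Set.mem_ofList, pv_bigramsA_eq]

-- A's per-word inner loop counts the documents whose feature set contains the word
theorem pv_doc_count (i : String) (docs : List String) :
    docs.foldl (fun count s =>
      if (PySem.Str.split₀ s).contains i then count + 1
      else if (pvBigramsA s).contains i then count + 1
      else count) (0 : Int)
    = (docs.countP (fun s => decide (i ∈ pvFeats s)) : Int) := by
  have hfun : (fun (count : Int) s =>
      if (PySem.Str.split₀ s).contains i then count + 1
      else if (pvBigramsA s).contains i then count + 1
      else count)
    = (fun (count : Int) s => if (fun s => decide (i ∈ pvFeats s)) s then count + 1 else count) := by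
    funext a s
    have hm : decide (i ∈ pvFeats s) = ((PySem.Str.split₀ s).contains i || (pvBigramsA s).contains i) := by
      rw [Bool.eq_iff_iff]
      simp only [decide_eq_true_eq, Bool.or_eq_true, List.contains_iff_mem]
      exact pv_mem_feats i s
    cases hc1 : (PySem.Str.split₀ s).contains i <;>
      cases hc2 : (pvBigramsA s).contains i <;>
      simp only [hc1, hc2, Bool.or_self, Bool.or_true, Bool.or_false] at hm <;>
      simp [hm, hc1, hc2]
  rw [hfun, PySem.List.foldl_if_add_one]
  simp

-- B's dict after the fold holds exactly those per-word document counts (for words in vs)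
theorem pv_dict_count (vs : PySem.Set String) (docs : List String) (d : PySem.Dict String Int)
    (w : String) (hw : w ∈ vs) :
    (docs.foldl (fun d doc =>
        (pvFeats doc).foldl (fun d t => if PySem.Set.contains vs t then d.modify t 0 (· + 1) else d) d) d).getD w 0
      = d.getD w 0 + (docs.countP (fun doc => decide (w ∈ pvFeats doc)) : Int) := by
  induction docs generalizing d with
  | nil => simp
  | cons doc rest ih =>
    simp only [List.foldl_cons, List.countP_cons]
    rw [ih]
    have hinner : ((pvFeats doc).foldl (fun d t => if PySem.Set.contains vs t then d.modify t 0 (· + 1) else d) d).getD w 0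
        = d.getD w 0 + (if decide (w ∈ pvFeats doc) then 1 else 0) := by
      rw [← List.foldl_filter (p := fun t => PySem.Set.contains vs t)
            (f := fun (d : PySem.Dict String Int) t => d.modify t 0 (· + 1))]
      rw [PySem.Dict.getD_foldl_modify_add_one]
      congr 1
      by_cases hm : w ∈ pvFeats doc
      · rw [List.count_filter (by simpa [PySem.Set.contains_iff] using hw)]
        simp [hm, List.count_eq_one_of_mem (pv_nodup_feats doc) hm]
      · simp only [hm, decide_false, if_neg Bool.false_ne_true]
        norm_num
        exact List.count_eq_zero_of_not_mem (fun hc => hm (List.mem_of_mem_filter hc))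
    rw [hinner]
    push_cast
    ring

-- A's per-document any-test is B's non-disjointness test
theorem pv_hit_eq (vglwortvek : List String) (docs : List String) :
    docs.foldl (fun acc s =>
      if (PySem.Str.split₀ s).any (fun v => vglwortvek.contains v) then acc + 1
      else if (pvBigramsA s).any (fun v => vglwortvek.contains v) then acc + 1
      else acc) (0 : Int)
    = docs.foldl (fun h doc => if PySem.Set.isdisjoint (PySem.Set.ofList vglwortvek) (pvFeats doc) then h else h + 1) (0 : Int) := by
  have hfun : (fun (acc : Int) s =>
      if (PySem.Str.split₀ s).any (fun v => vglwortvek.contains v) then acc + 1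
      else if (pvBigramsA s).any (fun v => vglwortvek.contains v) then acc + 1
      else acc)
    = (fun (h : Int) doc => if PySem.Set.isdisjoint (PySem.Set.ofList vglwortvek) (pvFeats doc) then h else h + 1) := by
    funext a s
    have hd : PySem.Set.isdisjoint (PySem.Set.ofList vglwortvek) (pvFeats s)
        = !((PySem.Str.split₀ s).any (fun v => vglwortvek.contains v)
            || (pvBigramsA s).any (fun v => vglwortvek.contains v)) := by
      rw [Bool.eq_iff_iff]
      simp only [PySem.Set.isdisjoint_iff, PySem.Set.mem_ofList, Bool.not_eq_true',
        Bool.or_eq_false_iff, List.any_eq_false, List.contains_iff_mem]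
      constructor
      · intro h
        constructor <;> intro v hv hvm <;> apply h v hvm
        · exact (pv_mem_feats v s).mpr (Or.inl hv)
        · exact (pv_mem_feats v s).mpr (Or.inr hv)
      · rintro ⟨h1, h2⟩ x hx hxf
        rcases (pv_mem_feats x s).mp hxf with hm | hm
        · exact h1 x hm hx
        · exact h2 x hm hx
    cases hc1 : (PySem.Str.split₀ s).any (fun v => vglwortvek.contains v) <;>
      cases hc2 : (pvBigramsA s).any (fun v => vglwortvek.contains v) <;>
      simp only [hc1, hc2, Bool.or_self, Bool.or_true, Bool.true_or, Bool.or_false, Bool.not_true, Bool.not_false] at hd <;>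
      simp [hd]
  rw [hfun]

-- each half of A's output equals the corresponding pvStats result
theorem pv_half (vglwortvek docs : List String) :
    (vglwortvek.map (fun i =>
      docs.foldl (fun count s =>
        if (PySem.Str.split₀ s).contains i then count + 1
        else if (pvBigramsA s).contains i then count + 1
        else count) (0 : Int))
      = (pvStats (PySem.Set.ofList vglwortvek) vglwortvek docs).1)
    ∧ (docs.foldl (fun acc s =>
        if (PySem.Str.split₀ s).any (fun v => vglwortvek.contains v) then acc + 1
        else if (pvBigramsA s).any (fun v => vglwortvek.contains v) then acc + 1
        else acc) (0 : Int)
      = (pvStats (PySem.Set.ofList vglwortvek) vglwortvek docs).2) := by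
  simp only [pvStats]
  rw [PySem.List.foldl_prod_mk
    (f := fun (d : PySem.Dict String Int) (doc : String) => (pvFeats doc).foldl (fun (e : PySem.Dict String Int) t => if PySem.Set.contains (PySem.Set.ofList vglwortvek) t then e.modify t 0 (· + 1) else e) d)
    (g := fun (h : Int) (doc : String) => if PySem.Set.isdisjoint (PySem.Set.ofList vglwortvek) (pvFeats doc) then h else h + 1)]
  constructor
  · apply List.map_congr_left
    intro i hi
    rw [pv_doc_count]
    rw [pv_dict_count (PySem.Set.ofList vglwortvek) docs PySem.Dict.empty i
      (by rw [PySem.Set.mem_ofList]; exact hi)]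
    simp
  · exact pv_hit_eq vglwortvek docs

-- ===== VERDICT (by name: the statement is the Claim_ definition above) =====
theorem getAnzahlen_spec : Claim_equal_getAnzahlen := by
  intro v K1 K2 _
  unfold Spec_getAnzahlen getAnzahlen getAnzahlen_alt
  obtain ⟨h1, h2⟩ := pv_half v K1
  obtain ⟨h3, h4⟩ := pv_half v K2
  simp only [h1, h2, h3, h4]
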